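-- pv_equiv track=rewrite | github.com/belarara/AoC_2023 | code/day_14.py | tilt_line
-- ===== SOURCE A (Python) =====
-- def tilt_line(line):
--     last = 0
--     for i in range(len(line)):
--         if line[i] == "#": last = i+1
--         if line[i] == "O":
--             line[i] = "."
--             line[last] = "O"
--             last += 1
--     return line
-- ===== SOURCE B (Python) =====
-- def tilt_line(line):
--     # Segment-based rebuild: between barriers, pack the O's at the front and
--     # blank their old spots, keeping every other element as-is; then assign
--     # back in place (same mutation of `line` as A's element swaps).
--     res = []
--     seg = []
--     for c in line:
--         if c == "#":
--             k = seg.count("O")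
--             res += ["O"] * k + ["." if x == "O" else x for x in seg[k:]] + ["#"]
--             seg = []
--         else:
--             seg.append(c)
--     k = seg.count("O")
--     res += ["O"] * k + ["." if x == "O" else x for x in seg[k:]]
--     line[:] = res
--     return line
-- ===== Notes on version B (the rewrite author's own statement) =====
-- stated objective: alternative
-- what changed: Instead of A's single rolling write-pointer with element swaps inside one index loop, B splits the line into segments at each '#', counts the 'O's per segment and rebuilds the segment as the packed O-block followed by the remaining elements (O's blanked), assembling a fresh list that is assigned back in place.
import Mathlib
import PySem

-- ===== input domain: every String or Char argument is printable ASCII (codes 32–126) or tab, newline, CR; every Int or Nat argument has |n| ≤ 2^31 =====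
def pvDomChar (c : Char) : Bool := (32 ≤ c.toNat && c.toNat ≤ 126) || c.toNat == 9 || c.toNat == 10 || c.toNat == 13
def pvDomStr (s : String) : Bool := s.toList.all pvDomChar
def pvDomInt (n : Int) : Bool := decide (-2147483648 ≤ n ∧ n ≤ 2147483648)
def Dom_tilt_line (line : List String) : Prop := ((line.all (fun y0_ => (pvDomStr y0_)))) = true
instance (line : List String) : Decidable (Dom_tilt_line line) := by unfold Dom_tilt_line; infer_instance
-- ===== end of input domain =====

-- B rebuilds the line segment-by-segment instead of A's rolling write pointer; same return value.
-- Both Pythons mutate `line` in place identically (B assigns back via line[:] = res); the equivalence proved is about the return value.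

-- ===== PORT A =====
-- one iteration of A's `for i in range(len(line))` loop; state = (current list, last)
def tiltStepA (st : List String × Nat) (i : Nat) : List String × Nat :=
  let st := if st.1.getD i "" == "#" then (st.1, i + 1) else st
  if st.1.getD i "" == "O" then ((st.1.set i ".").set st.2 "O", st.2 + 1)
  else st

def tilt_line (line : List String) : List String :=
  ((List.range line.length).foldl tiltStepA (line, 0)).1

-- ===== PORT B =====
-- rebuilt output of one closed segment: k 'O's up front, then the rest with 'O' blanked
def segOut (seg : List String) : List String :=
  List.replicate (seg.count "O") "O" ++ (seg.drop (seg.count "O")).map (fun x => if x == "O" then "." else x)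

-- one iteration of B's `for c in line` loop; state = (res, seg)
def tiltStepB (st : List String × List String) (c : String) : List String × List String :=
  if c == "#" then (st.1 ++ segOut st.2 ++ ["#"], [])
  else (st.1, st.2 ++ [c])

def tilt_line_alt (line : List String) : List String :=
  let st := line.foldl tiltStepB ([], [])
  st.1 ++ segOut st.2

-- ===== PRECONDITION & SPEC =====
def Spec_tilt_line (line : List String) (out : List String) : Prop := out = tilt_line_alt line
instance (line : List String) (out : List String) : Decidable (Spec_tilt_line line out) := by unfold Spec_tilt_line; infer_instance

-- ===== CLAIM (what is proved, stated in full; the proofs are below) =====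
def Claim_equal_tilt_line : Prop := ∀ (line : List String), Dom_tilt_line line → Spec_tilt_line line (tilt_line line)

-- ===== LEMMAS AND PROOFS =====

lemma tiltStepA_sharp (l : List String) (last i : Nat) (h : l.getD i "" = "#") :
    tiltStepA (l, last) i = (l, i + 1) := by
  rw [List.getD_eq_getElem?_getD] at h
  simp [tiltStepA, h]

lemma tiltStepA_O (l : List String) (last i : Nat) (h : l.getD i "" = "O") :
    tiltStepA (l, last) i = ((l.set i ".").set last "O", last + 1) := by
  rw [List.getD_eq_getElem?_getD] at h
  simp [tiltStepA, h]

lemma tiltStepA_other (l : List String) (last i : Nat)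
    (h1 : ¬ l.getD i "" = "#") (h2 : ¬ l.getD i "" = "O") :
    tiltStepA (l, last) i = (l, last) := by
  rw [List.getD_eq_getElem?_getD] at h1 h2
  simp [tiltStepA, h1, h2]

lemma tiltStepB_sharp (st : List String × List String) :
    tiltStepB st "#" = (st.1 ++ segOut st.2 ++ ["#"], []) := by
  simp [tiltStepB]

lemma tiltStepB_other (st : List String × List String) (c : String) (h : ¬ c = "#") :
    tiltStepB st c = (st.1, st.2 ++ [c]) := by
  simp [tiltStepB, h]

lemma segOut_length (s : List String) : (segOut s).length = s.length := by
  have h := List.count_le_length (a := "O") (l := s)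
  simp [segOut]
  omega

lemma foldB_len (l : List String) : ∀ (a b : List String),
    ((l.foldl tiltStepB (a, b)).1).length + ((l.foldl tiltStepB (a, b)).2).length
      = a.length + b.length + l.length := by
  induction l with
  | nil => intro a b; simp
  | cons c l ih =>
    intro a b
    by_cases hc : c = "#"
    · simp [tiltStepB, hc, ih, segOut_length]; omega
    · simp only [List.foldl_cons, tiltStepB, beq_iff_eq, hc, if_false]
      rw [ih]; simp; omega

-- xs[i] = v when i points exactly between two known append blocks
lemma set_at2 {α : Type} (p q suf : List α) (x v : α) (i : Nat) (h : i = p.length + q.length) :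
    (p ++ (q ++ x :: suf)).set i v = p ++ (q ++ v :: suf) := by
  subst h
  rw [List.set_append_right _ _ (Nat.le_add_right _ _), Nat.add_sub_cancel_left,
    List.set_append_right _ _ (Nat.le_refl _), Nat.sub_self, List.set_cons_zero]

-- the loop invariant: after n steps A's state is B's partial rebuild ++ the untouched suffix,
-- and A's write pointer is res.length + (count of 'O' in the open segment)
lemma invA (xs : List String) : ∀ (n : Nat), n ≤ xs.length →
    (List.range n).foldl tiltStepA (xs, 0)
      = (((xs.take n).foldl tiltStepB ([], [])).1
           ++ segOut ((xs.take n).foldl tiltStepB ([], [])).2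
           ++ xs.drop n,
         ((xs.take n).foldl tiltStepB ([], [])).1.length
           + ((xs.take n).foldl tiltStepB ([], [])).2.count "O") := by
  intro n
  induction n with
  | zero => intro _; simp [segOut]
  | succ n ih =>
    intro hn
    have hn' : n < xs.length := by omega
    rw [List.range_succ, List.foldl_append, ih (by omega)]
    set st := (xs.take n).foldl tiltStepB ([], []) with hst
    obtain ⟨B1, B2⟩ := st
    set c : String := xs[n] with hc
    have hdrop : xs.drop n = c :: xs.drop (n + 1) := List.drop_eq_getElem_cons hn'
    have htake : xs.take (n + 1) = xs.take n ++ [c] := by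
      rw [List.take_add_one]; simp [List.getElem?_eq_getElem hn', hc]
    have hlen : B1.length + B2.length = n := by
      have := foldB_len (xs.take n) [] []
      rw [← hst] at this
      simpa [List.length_take, Nat.min_eq_left (le_of_lt hn')] using this
    have hPlen : (B1 ++ segOut B2).length = n := by simp [segOut_length]; omega
    have hget : (B1 ++ segOut B2 ++ xs.drop n).getD n "" = c := by
      rw [hdrop, List.getD_eq_getElem?_getD, ← hPlen,
        List.getElem?_append_right (le_refl _)]
      simp
    have hk : B2.count "O" ≤ B2.length := List.count_le_length
    rw [htake, List.foldl_append, ← hst]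
    simp only [List.foldl_cons, List.foldl_nil]
    by_cases hsharp : c = "#"
    · -- barrier: the open segment closes
      rw [hsharp] at hget hdrop
      rw [hsharp, tiltStepA_sharp _ _ _ hget, tiltStepB_sharp, hdrop]
      simp only [Prod.mk.injEq]
      refine ⟨by simp [segOut], by simp [segOut_length]; omega⟩
    · by_cases hO : c = "O"
      · -- a rock rolls to position B1.length + B2.count "O"
        rw [hO] at hget hdrop
        rw [hO, tiltStepA_O _ _ _ hget, tiltStepB_other _ _ (by decide), hdrop]
        have hcnt : (B2 ++ ["O"]).count "O" = B2.count "O" + 1 := by simp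
        simp only [Prod.mk.injEq]
        refine ⟨?_, by simp [hcnt]; omega⟩
        -- the list after the two writes
        simp only [List.append_assoc]
        rw [set_at2 B1 (segOut B2) (xs.drop (n + 1)) "O" "." n
          (by have := segOut_length B2; omega)]
        simp only [segOut, hcnt, List.append_assoc]
        rcases Nat.lt_or_ge (B2.count "O") B2.length with hlt | hge
        · -- the pointer lands on the first un-packed element of the open segment
          have hdropB2 : B2.drop (B2.count "O") = B2[B2.count "O"] :: B2.drop (B2.count "O" + 1) :=
            List.drop_eq_getElem_cons hlt
          have hdrop2 : (B2 ++ ["O"]).drop (B2.count "O" + 1)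
              = B2.drop (B2.count "O" + 1) ++ ["O"] :=
            List.drop_append_of_le_length hlt
          rw [hdropB2, hdrop2]
          simp only [List.map_cons, List.map_append, List.cons_append, List.append_assoc]
          rw [set_at2 B1 (List.replicate (B2.count "O") "O") _ _ _ _ (by simp)]
          simp [List.replicate_succ' (n := B2.count "O")]
        · -- the whole open segment is 'O's: the pointer is n, overwriting the '.' just written
          have heq : B2.count "O" = B2.length := le_antisymm hk hge
          have hdropB2 : B2.drop (B2.count "O") = [] := by simp [heq]
          have hdrop2 : (B2 ++ ["O"]).drop (B2.count "O" + 1) = [] := by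
            apply List.drop_eq_nil_of_le; simp [heq]
          rw [hdropB2, hdrop2]
          simp only [List.map_nil, List.nil_append]
          rw [set_at2 B1 (List.replicate (B2.count "O") "O") _ _ _ _ (by simp)]
          simp [List.replicate_succ' (n := B2.count "O")]
      · -- ordinary element: kept where it is
        rw [tiltStepA_other _ _ _ (by rw [hget]; exact hsharp) (by rw [hget]; exact hO),
          tiltStepB_other _ _ hsharp, hdrop]
        have hcnt : (B2 ++ [c]).count "O" = B2.count "O" := by simp [hO]
        have hsegc : segOut (B2 ++ [c]) = segOut B2 ++ [c] := by
          rw [segOut, segOut, hcnt, List.drop_append_of_le_length hk, List.map_append]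
          simp [hO]
        simp only [Prod.mk.injEq]
        exact ⟨by rw [hsegc]; simp, by rw [hcnt]⟩

-- ===== VERDICT (by name: the statement is the Claim_ definition above) =====
theorem tilt_line_spec : Claim_equal_tilt_line := by
  intro line _
  unfold Spec_tilt_line tilt_line tilt_line_alt
  rw [invA line line.length (le_refl _)]
  simp
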